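-- pv_equiv track=rewrite | github.com/harshitpoddar09/CodeChef-Solutions | Beginner/Chef Diet.py | diet
-- ===== SOURCE A (Python) =====
-- def diet(n,k,a):
--     b=0
--     for j in range(n):
--         b+=a[j]
--         b-=k
--         if b<0:
--             return 'NO '+str(j+1)
--     return 'YES'
-- ===== SOURCE B (Python) =====
-- def diet(n, k, a):
--     # build the full table of running totals of a[j]-k, then scan it
--     totals = []
--     t = 0
--     for j in range(n):
--         t = t + a[j] - k
--         totals.append(t)
--     for j, t in enumerate(totals):
--         if t < 0:
--             return 'NO ' + str(j + 1)
--     return 'YES'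
-- ===== Notes on version B (the rewrite author's own statement) =====
-- stated objective: alternative
-- what changed: B replaces A's single interleaved accumulate-and-test loop by a two-pass decomposition: first materialise the whole prefix-sum table of a[j]-k, then a separate enumerate scan finds the first negative total.
-- outside the precondition, e.g. on diet(2, 1, [-5]): A returns 'NO 1', B raises IndexError
import Mathlib
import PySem

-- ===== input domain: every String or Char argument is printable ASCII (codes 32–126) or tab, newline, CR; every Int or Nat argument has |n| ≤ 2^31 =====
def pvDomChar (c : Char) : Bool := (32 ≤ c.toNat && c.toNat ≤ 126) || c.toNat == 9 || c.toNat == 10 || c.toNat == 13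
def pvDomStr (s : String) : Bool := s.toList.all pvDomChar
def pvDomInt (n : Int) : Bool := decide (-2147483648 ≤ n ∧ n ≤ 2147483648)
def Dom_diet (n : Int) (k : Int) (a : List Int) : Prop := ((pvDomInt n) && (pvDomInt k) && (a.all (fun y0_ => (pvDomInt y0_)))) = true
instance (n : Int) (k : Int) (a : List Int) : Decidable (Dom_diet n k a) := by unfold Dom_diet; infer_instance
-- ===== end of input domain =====

-- B differs only in decomposition (build the prefix-sum table, then scan it); return values agree on Pre_.
-- Both 'for j in range(n)' loops are ported as counter recursions (Python's range is lazy).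

-- ===== PORT A =====
-- the for-loop of A: running total b, early return on b < 0
def dietA_loop (n : Int) (k : Int) (a : List Int) (b : Int) (j : Int) : String :=
  if j < n then
    match PySem.List.pyGet? a j with
    | none => ""            -- Python raises IndexError here; excluded by Pre_diet
    | some x =>
      let b1 := b + x
      let b2 := b1 - k
      if b2 < 0 then "NO " ++ PySem.Int.toStr (j + 1) else dietA_loop n k a b2 (j + 1)
  else "YES"
termination_by (n - j).toNat
decreasing_by omega

def diet (n : Int) (k : Int) (a : List Int) : String :=
  dietA_loop n k a 0 0

-- ===== PORT B =====
-- first pass of B: totals.append(t) for each j in range(n)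
-- (the growing 'totals' list is accumulated reversed and reversed once at the end)
def dietB_build (n : Int) (k : Int) (a : List Int) (t : Int) (j : Int) (acc : List Int) : List Int :=
  if j < n then
    match PySem.List.pyGet? a j with
    | none => acc.reverse   -- Python raises IndexError here; excluded by Pre_diet
    | some x =>
      let t' := t + x - k
      dietB_build n k a t' (j + 1) (t' :: acc)
  else acc.reverse
termination_by (n - j).toNat
decreasing_by omega

-- second pass of B: 'for j, t in enumerate(totals)', ported with an explicit running counter j
def dietB_scan (j : Int) : List Int → String
  | [] => "YES"
  | t :: rest => if t < 0 then "NO " ++ PySem.Int.toStr (j + 1) else dietB_scan (j + 1) rest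

def diet_alt (n : Int) (k : Int) (a : List Int) : String :=
  dietB_scan 0 (dietB_build n k a 0 0 [])

-- ===== PRECONDITION & SPEC =====
-- Pre_diet excludes n > len(a): there A indexes past the end (IndexError unless an earlier
-- total is already negative — outside the problem's domain, where n is the length of a);
-- B's table-building pass raises IndexError on all such inputs.
def Pre_diet (n : Int) (k : Int) (a : List Int) : Prop := n ≤ (a.length : Int)
instance (n : Int) (k : Int) (a : List Int) : Decidable (Pre_diet n k a) := by unfold Pre_diet; infer_instance
def pvWitness_diet : Int × Int × List Int := (3, 2, [5, 1, 4])

def Spec_diet (n : Int) (k : Int) (a : List Int) (out : String) : Prop := out = diet_alt n k a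
instance (n : Int) (k : Int) (a : List Int) (out : String) : Decidable (Spec_diet n k a out) := by unfold Spec_diet; infer_instance

-- ===== CLAIM (what is proved, stated in full; the proofs are below) =====
def Claim_equal_diet : Prop := ∀ (n : Int) (k : Int) (a : List Int), Dom_diet n k a → Pre_diet n k a → Spec_diet n k a (diet n k a)

-- ===== LEMMAS AND PROOFS =====

-- proof-side recursive form of B's first pass (no reversed accumulator)
def buildRec (k : Int) (a : List Int) : Int → Int → Nat → List Int
  | _, _, 0 => []
  | t, j, c + 1 =>
    let t' := t + (PySem.List.pyGet? a j).getD 0 - k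
    t' :: buildRec k a t' (j + 1) c

lemma build_eq (n k : Int) (a : List Int) :
    ∀ (cnt : Nat) (j t : Int) (acc : List Int), 0 ≤ j → (n - j).toNat = cnt → n ≤ (a.length : Int) →
      dietB_build n k a t j acc = acc.reverse ++ buildRec k a t j cnt := by
  intro cnt
  induction cnt with
  | zero =>
    intro j t acc hj hcnt hlen
    rw [dietB_build]
    simp only [buildRec, List.append_nil]
    rw [if_neg (by omega)]
  | succ c ih =>
    intro j t acc hj hcnt hlen
    have hjn : j < n := by omega
    have hget : PySem.List.pyGet? a j = some (a[j.toNat]'(by omega)) :=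
      PySem.List.pyGet?_eq_some_getElem a hj (by omega)
    rw [dietB_build, if_pos hjn]
    simp only [hget, buildRec]
    rw [ih (j + 1) _ _ (by omega) (by omega) hlen]
    simp

lemma diet_key (n k : Int) (a : List Int) :
    ∀ (cnt : Nat) (j b : Int), 0 ≤ j → (n - j).toNat = cnt → n ≤ (a.length : Int) →
      dietA_loop n k a b j = dietB_scan j (buildRec k a b j cnt) := by
  intro cnt
  induction cnt with
  | zero =>
    intro j b hj hcnt hlen
    rw [dietA_loop, if_neg (by omega)]
    simp [buildRec, dietB_scan]
  | succ c ih =>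
    intro j b hj hcnt hlen
    have hjn : j < n := by omega
    have hget : PySem.List.pyGet? a j = some (a[j.toNat]'(by omega)) :=
      PySem.List.pyGet?_eq_some_getElem a hj (by omega)
    rw [dietA_loop, if_pos hjn]
    simp only [hget, buildRec, Option.getD_some, dietB_scan]
    split_ifs with h1
    · rfl
    · exact ih (j + 1) _ (by omega) (by omega) hlen

-- ===== VERDICT (by name: the statement is the Claim_ definition above) =====
theorem diet_spec : Claim_equal_diet := by
  intro n k a _ hpre
  unfold Pre_diet at hpre
  unfold Spec_diet diet diet_alt
  rw [build_eq n k a (n - 0).toNat 0 0 [] le_rfl rfl hpre]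
  simpa using diet_key n k a (n - 0).toNat 0 0 le_rfl rfl hpre
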